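-- pv_equiv track=rewrite | github.com/aparfenen/grna-inspector | src/grna_inspector/feature_extraction.py | _max_homopolymer
-- ===== SOURCE A (Python) =====
-- def _max_homopolymer(seq: str) -> int:
--     """Find maximum homopolymer run length."""
--     if len(seq) == 0:
--         return 0
--     max_len = 1
--     current_len = 1
--     for i in range(1, len(seq)):
--         if seq[i] == seq[i-1]:
--             current_len += 1
--             max_len = max(max_len, current_len)
--         else:
--             current_len = 1
--     return max_len
-- ===== SOURCE B (Python) =====
-- def _max_homopolymer(seq: str) -> int:
--     """Find maximum homopolymer run length (run-skipping scan)."""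
--     best = 0
--     i = 0
--     n = len(seq)
--     while i < n:
--         j = i + 1
--         while j < n and seq[j] == seq[i]:
--             j += 1
--         if j - i > best:
--             best = j - i
--         i = j
--     return best
-- ===== Notes on version B (the rewrite author's own statement) =====
-- stated objective: alternative
-- what changed: Replaces the current/max counter pair updated per adjacent-character comparison by a run-skipping scan: an outer loop over run starts whose inner loop finds the end of each maximal run and compares the run length against the best once per run, with no counters and no empty-string guard.
import Mathlib
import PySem

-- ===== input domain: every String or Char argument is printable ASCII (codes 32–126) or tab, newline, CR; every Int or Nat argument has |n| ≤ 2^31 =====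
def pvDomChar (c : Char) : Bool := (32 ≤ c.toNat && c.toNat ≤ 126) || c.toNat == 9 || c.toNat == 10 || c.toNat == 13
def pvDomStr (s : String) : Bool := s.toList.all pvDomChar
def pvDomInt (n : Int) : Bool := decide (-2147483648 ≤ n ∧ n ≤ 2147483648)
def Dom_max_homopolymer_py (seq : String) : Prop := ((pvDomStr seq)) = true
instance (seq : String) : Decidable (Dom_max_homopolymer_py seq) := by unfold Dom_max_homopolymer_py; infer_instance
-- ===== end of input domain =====

-- B replaces A's per-character current/max counter pair by a run-skipping scan
-- (outer loop over run starts, inner loop finding each run's end); alternative, same asymptotic cost.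

-- ===== PORT A =====
-- literal port of A: counter loop over indices 1..len-1, state (max_len, current_len)
def max_homopolymer_py (seq : String) : Int :=
  if PySem.Str.len seq = 0 then 0
  else
    let l := seq.toList
    let st := (PySem.List.pyRange 1 (PySem.Str.len seq) 1).foldl
      (fun (p : Int × Int) i =>
        if PySem.List.pyGetD l i ' ' = PySem.List.pyGetD l (i - 1) ' ' then
          (max p.1 (p.2 + 1), p.2 + 1)
        else (p.1, 1)) (1, 1)
    st.1

-- ===== PORT B =====
-- inner while loop of B: number of leading chars of the suffix equal to the run-start char
def pvInner (c : Char) : List Char → Nat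
  | [] => 0
  | x :: xs => if x = c then 1 + pvInner c xs else 0

-- outer while loop of B: over run starts; `run > best` update, then jump past the run
def pvOuter : List Char → Int → Int
  | [], best => best
  | c :: rest, best =>
      let k := pvInner c rest
      let run : Int := 1 + (k : Int)
      pvOuter (rest.drop k) (if run > best then run else best)
termination_by l _ => l.length
decreasing_by simp

def max_homopolymer_py_alt (seq : String) : Int :=
  pvOuter seq.toList 0

-- ===== PRECONDITION & SPEC =====
def Spec_max_homopolymer_py (seq : String) (out : Int) : Prop := out = max_homopolymer_py_alt seq
instance (seq : String) (out : Int) : Decidable (Spec_max_homopolymer_py seq out) := by unfold Spec_max_homopolymer_py; infer_instance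

-- ===== CLAIM (what is proved, stated in full; the proofs are below) =====
def Claim_equal_max_homopolymer_py : Prop := ∀ (seq : String), Dom_max_homopolymer_py seq → Spec_max_homopolymer_py seq (max_homopolymer_py seq)

-- ===== LEMMAS AND PROOFS =====

-- A's loop body, re-expressed over the character list (prev = previous character)
def loopA : Char → List Char → Int × Int → Int × Int
  | _, [], st => st
  | prev, x :: xs, (m, cur) =>
      if x = prev then loopA x xs (max m (cur + 1), cur + 1) else loopA x xs (m, 1)

-- A's index fold equals the structural recursion loopA
theorem foldA_eq_loopA (l : List Char) :
    ∀ (suf : List Char) (n : Nat) (prev : Char) (st : Int × Int),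
      l.drop n = suf → 1 ≤ n → l[n - 1]? = some prev →
      (PySem.List.pyRange (n : Int) (l.length : Int) 1).foldl
        (fun (p : Int × Int) i =>
          if PySem.List.pyGetD l i ' ' = PySem.List.pyGetD l (i - 1) ' ' then
            (max p.1 (p.2 + 1), p.2 + 1)
          else (p.1, 1)) st = loopA prev suf st := by
  intro suf
  induction suf with
  | nil =>
      intro n prev st hdrop _ _
      have hn : l.length ≤ n := by
        by_contra h
        have : l.drop n ≠ [] := by
          simp [List.drop_eq_nil_iff]; omega
        exact this hdrop
      rw [PySem.List.pyRange_one_eq_nil (by exact_mod_cast hn)]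
      simp [loopA]
  | cons x xs ih =>
      intro n prev st hdrop hn hprev
      have hlt : n < l.length := by
        by_contra h
        have : l.drop n = [] := by simp [List.drop_eq_nil_iff]; omega
        simp [this] at hdrop
      have hx? : l[n]? = some x := by
        rw [← List.head?_drop, hdrop]; rfl
      have hx : l[n]'hlt = x := by
        rw [List.getElem?_eq_getElem hlt] at hx?
        exact Option.some.inj hx?
      have hgn : PySem.List.pyGetD l (n : Int) ' ' = x := by
        rw [PySem.List.pyGetD_eq_getElem l ' ' (by omega) (by exact_mod_cast hlt)]
        simpa using hx
      have hprev' : l[n - 1]'(by omega) = prev := by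
        rw [List.getElem?_eq_getElem (by omega : n - 1 < l.length)] at hprev
        exact Option.some.inj hprev
      have hgp : PySem.List.pyGetD l ((n : Int) - 1) ' ' = prev := by
        have he : ((n : Int) - 1) = ((n - 1 : Nat) : Int) := by omega
        rw [he, PySem.List.pyGetD_eq_getElem l ' ' (by omega)
          (by exact_mod_cast (by omega : n - 1 < l.length))]
        simpa using hprev'
      have hdrop' : l.drop (n + 1) = xs := by
        rw [List.drop_add_one_eq_tail_drop, hdrop]; rfl
      have hnext : l[(n + 1) - 1]? = some x := by
        simp [List.getElem?_eq_getElem hlt, hx]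
      have hcast : ((n : Int) + 1) = ((n + 1 : Nat) : Int) := by push_cast; ring
      rcases st with ⟨m, cur⟩
      rw [PySem.List.pyRange_one_cons (by exact_mod_cast hlt)]
      simp only [List.foldl_cons, hgn, hgp, loopA, hcast]
      split_ifs with hxc
      · exact ih (n + 1) x _ hdrop' (by omega) hnext
      · exact ih (n + 1) x _ hdrop' (by omega) hnext

theorem pvOuter_if_max (best run : Int) :
    (if run > best then run else best) = max best run := by
  split_ifs with h <;> omega

-- core bridge: the counter loop equals the run-skipping loop
theorem loopA_eq_pvOuter :
    ∀ (rest : List Char) (c : Char) (m cur : Int), 1 ≤ cur → cur ≤ m →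
      (loopA c rest (m, cur)).1 =
        pvOuter (rest.drop (pvInner c rest)) (max m (cur + (pvInner c rest : Int))) := by
  intro rest
  induction rest with
  | nil =>
      intro c m cur h1 h2
      simp only [loopA, pvInner, List.drop_nil, Nat.cast_zero, add_zero, pvOuter]
      omega
  | cons x xs ih =>
      intro c m cur h1 h2
      by_cases hxc : x = c
      · have hk : pvInner c (x :: xs) = pvInner c xs + 1 := by
          simp [pvInner, hxc]; omega
        rw [show loopA c (x :: xs) (m, cur) = loopA x xs (max m (cur + 1), cur + 1) from by
          simp [loopA, hxc]]
        rw [ih x (max m (cur + 1)) (cur + 1) (by omega) (by omega)]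
        rw [hk, List.drop_succ_cons, hxc]
        congr 1
        push_cast
        omega
      · have hk : pvInner c (x :: xs) = 0 := by simp [pvInner, hxc]
        rw [show loopA c (x :: xs) (m, cur) = loopA x xs (m, 1) from by
          simp [loopA, hxc]]
        rw [ih x m 1 (by omega) (by omega)]
        rw [hk]
        simp only [List.drop_zero, Nat.cast_zero, add_zero, max_eq_left h2]
        rw [pvOuter, pvOuter_if_max]

-- ===== VERDICT (by name: the statement is the Claim_ definition above) =====
theorem max_homopolymer_py_spec : Claim_equal_max_homopolymer_py := by
  intro seq _
  unfold Spec_max_homopolymer_py max_homopolymer_py max_homopolymer_py_alt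
  rcases hl : seq.toList with _ | ⟨c, rest⟩
  · simp [PySem.Str.len_eq, hl, pvOuter]
  · have hne : PySem.Str.len seq ≠ 0 := by
      simp only [PySem.Str.len_eq, hl, List.length_cons]
      push_cast
      omega
    rw [if_neg hne]
    simp only [PySem.Str.len_eq, hl]
    have hb := foldA_eq_loopA (c :: rest) rest 1 c (1, 1)
      (by simp) (le_refl 1) (by simp)
    norm_num at hb
    rw [show (((c :: rest).length : Nat) : Int) = (rest.length : Int) + 1 from by simp]
    rw [hb]
    rw [loopA_eq_pvOuter rest c 1 1 (le_refl 1) (le_refl 1)]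
    rw [pvOuter, pvOuter_if_max]
    congr 1
    omega
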